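-- pv_equiv track=rewrite | github.com/s-nakk/cc-mnemos | src/cc_mnemos/store.py | _split_query_tokens
-- ===== SOURCE A (Python) =====
-- def _split_query_tokens(query: str) -> tuple[list[str], list[str]]:
--     """クエリをFTS5用トークンと短語に分割する
--
--     Args:
--         query: 生のクエリ文字列
--
--     Returns:
--         (3文字以上のトークンリスト, 3文字未満の短語リスト)
--     """
--     special_chars = set('"*():^{}[]!&|~@#$%')
--     cleaned = ""
--     for ch in query:
--         if ch in special_chars:
--             cleaned += " "
--         else:
--             cleaned += ch
--
--     tokens = cleaned.split()
--     long_tokens: list[str] = []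
--     short_tokens: list[str] = []
--     for t in tokens:
--         if not t:
--             continue
--         if len(t) >= 3:
--             long_tokens.append(t)
--         else:
--             short_tokens.append(t)
--     return long_tokens, short_tokens
-- ===== SOURCE B (Python) =====
-- def _split_query_tokens(query: str) -> tuple[list[str], list[str]]:
--     """Single-pass tokenizer: no intermediate cleaned string, no str.split()."""
--     special_chars = '"*():^{}[]!&|~@#$%'
--     long_tokens: list[str] = []
--     short_tokens: list[str] = []
--     current = ""
--     for ch in query:
--         if ch in special_chars or ch.isspace():
--             if current:
--                 (long_tokens if len(current) >= 3 else short_tokens).append(current)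
--                 current = ""
--         else:
--             current += ch
--     if current:
--         (long_tokens if len(current) >= 3 else short_tokens).append(current)
--     return long_tokens, short_tokens
-- ===== Notes on version B (the rewrite author's own statement) =====
-- stated objective: simpler
-- what changed: Replaced the three passes (build a cleaned copy of the string, str.split() it, then partition the token list) by one single-pass tokenizer that keeps a current-token buffer and classifies each token into long/short the moment a delimiter (special char or whitespace) ends it.
import Mathlib
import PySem

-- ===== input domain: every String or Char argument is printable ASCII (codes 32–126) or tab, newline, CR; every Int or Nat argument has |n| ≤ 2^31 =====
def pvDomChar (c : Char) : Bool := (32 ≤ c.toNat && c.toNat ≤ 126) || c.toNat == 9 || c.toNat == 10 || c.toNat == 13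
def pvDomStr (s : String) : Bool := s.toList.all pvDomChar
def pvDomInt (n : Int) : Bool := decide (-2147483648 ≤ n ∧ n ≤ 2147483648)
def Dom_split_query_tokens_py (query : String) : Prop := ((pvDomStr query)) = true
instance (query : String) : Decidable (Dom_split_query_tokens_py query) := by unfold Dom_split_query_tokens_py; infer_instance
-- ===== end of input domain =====

-- B replaces A's three passes (clean the string, str.split() it, partition the tokens)
-- by a single-pass tokenizer with a current-token buffer; same return value, chosen for simplicity.


-- ===== PORT A =====
-- set('"*():^{}[]!&|~@#$%')
def pvSpecialSetA : PySem.Set Char := PySem.Set.ofList "\"*():^{}[]!&|~@#$%".toList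

-- literal transliteration of A: build `cleaned` char by char, split() it, then
-- partition the token list (strings are handled as List Char, exact on code points).
def split_query_tokens_py (query : String) : List String × List String :=
  let cleaned : List Char :=
    query.toList.foldl (fun acc ch =>
      if pvSpecialSetA.contains ch then acc ++ [' '] else acc ++ [ch]) []
  let tokens := PySem.Chars.split₀ cleaned
  let p := tokens.foldl (fun (p : List String × List String) t =>
      if t.isEmpty then p
      else if 3 ≤ t.length then (p.1 ++ [String.mk t], p.2)
      else (p.1, p.2 ++ [String.mk t])) ([], [])
  (p.1, p.2)

-- ===== PORT B =====
-- `ch in special_chars` for a single char = membership among the string's chars (exact)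
def pvSpecialB (c : Char) : Bool := "\"*():^{}[]!&|~@#$%".toList.contains c

-- single pass over the chars; the `current` str buffer carried in Python's order (cur ++ [c])
def pvAltGo : List Char → List Char → List String → List String → List String × List String
  | [], cur, long, short =>
      if cur.isEmpty then (long, short)
      else if 3 ≤ cur.length then (long ++ [String.mk cur], short)
      else (long, short ++ [String.mk cur])
  | c :: rest, cur, long, short =>
      if pvSpecialB c || PySem.Chars.isspace c then
        if cur.isEmpty then pvAltGo rest [] long short
        else if 3 ≤ cur.length then pvAltGo rest [] (long ++ [String.mk cur]) short
        else pvAltGo rest [] long (short ++ [String.mk cur])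
      else pvAltGo rest (cur ++ [c]) long short

def split_query_tokens_py_alt (query : String) : List String × List String :=
  pvAltGo query.toList [] [] []

-- ===== PRECONDITION & SPEC =====
def Spec_split_query_tokens_py (query : String) (out : List String × List String) : Prop := out = split_query_tokens_py_alt query
instance (query : String) (out : List String × List String) : Decidable (Spec_split_query_tokens_py query out) := by unfold Spec_split_query_tokens_py; infer_instance

-- ===== CLAIM (what is proved, stated in full; the proofs are below) =====
def Claim_equal_split_query_tokens_py : Prop := ∀ (query : String), Dom_split_query_tokens_py query → Spec_split_query_tokens_py query (split_query_tokens_py query)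

-- ===== LEMMAS AND PROOFS =====

-- the char substitution A performs
def pvClean (c : Char) : Char := if pvSpecialSetA.contains c then ' ' else c

lemma pvCleaned_eq_map (s : List Char) (acc : List Char) :
    s.foldl (fun acc ch =>
      if pvSpecialSetA.contains ch then acc ++ [' '] else acc ++ [ch]) acc
      = acc ++ s.map pvClean := by
  induction s generalizing acc with
  | nil => simp
  | cons c rest ih =>
      rw [List.foldl_cons, List.map_cons, ih]
      by_cases h : pvSpecialSetA.contains c = true
      · rw [if_pos h, show pvClean c = ' ' by unfold pvClean; rw [if_pos h]]; simp
      · rw [if_neg h, show pvClean c = c by unfold pvClean; rw [if_neg h]]; simp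

lemma pvSpecial_eq (c : Char) : pvSpecialB c = pvSpecialSetA.contains c := by
  have : pvSpecialSetA = "\"*():^{}[]!&|~@#$%".toList := by rfl
  rw [this]; rfl

lemma pvIsspace_clean (c : Char) :
    PySem.Chars.isspace (pvClean c) = (pvSpecialB c || PySem.Chars.isspace c) := by
  rw [pvSpecial_eq]; unfold pvClean
  by_cases h : pvSpecialSetA.contains c = true
  · rw [if_pos h, h, Bool.true_or]; decide
  · have h' : pvSpecialSetA.contains c = false := by simpa using h
    rw [if_neg h, h', Bool.false_or]

lemma pvClean_of_not_space (c : Char) (h : PySem.Chars.isspace (pvClean c) = false) :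
    pvClean c = c := by
  unfold pvClean at *
  by_cases hs : pvSpecialSetA.contains c = true
  · rw [if_pos hs] at h; exact absurd h (by decide)
  · rw [if_neg hs]

-- step function of A's partition fold
def pvStep (p : List String × List String) (t : List Char) : List String × List String :=
  if t.isEmpty then p
  else if 3 ≤ t.length then (p.1 ++ [String.mk t], p.2)
  else (p.1, p.2 ++ [String.mk t])

-- split₀.go prepends its pending accumulator's reverse
lemma pvGo_acc (s : List Char) (cur : List Char) (acc : List (List Char)) :
    PySem.Chars.split₀.go s cur acc = acc.reverse ++ PySem.Chars.split₀.go s cur [] := by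
  induction s generalizing cur acc with
  | nil =>
      rw [PySem.Chars.split₀.go.eq_1, PySem.Chars.split₀.go.eq_1]
      by_cases h : cur.isEmpty = true <;> simp [h]
  | cons c rest ih =>
      rw [PySem.Chars.split₀.go.eq_2, PySem.Chars.split₀.go.eq_2]
      by_cases hs : PySem.Chars.isspace c = true
      · rw [if_pos hs, if_pos hs]
        by_cases h : cur.isEmpty = true
        · rw [if_pos h, if_pos h, ih [] acc]
        · rw [if_neg h, if_neg h, ih [] (cur.reverse :: acc), ih [] [cur.reverse]]
          simp
      · rw [if_neg hs, if_neg hs, ih (c :: cur) acc]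

-- main invariant: A's partition fold over split₀ of the cleaned suffix = B's single pass
lemma pvMain (s : List Char) (cur : List Char) (long short : List String) :
    (PySem.Chars.split₀.go (s.map pvClean) cur.reverse []).foldl pvStep (long, short)
      = pvAltGo s cur long short := by
  induction s generalizing cur long short with
  | nil =>
      rw [List.map_nil, PySem.Chars.split₀.go.eq_1]
      by_cases h : cur.isEmpty = true
      · have : cur = [] := by simpa [List.isEmpty_iff] using h
        subst this
        simp [pvAltGo]
      · rw [if_neg (by simpa [List.isEmpty_reverse] using h)]
        simp only [List.reverse_reverse, List.reverse_nil, List.foldl_cons, List.foldl_nil]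
        simp [pvAltGo, pvStep, h]
  | cons c rest ih =>
      rw [List.map_cons, PySem.Chars.split₀.go.eq_2]
      by_cases hs : PySem.Chars.isspace (pvClean c) = true
      · rw [if_pos hs]
        have hd : (pvSpecialB c || PySem.Chars.isspace c) = true := by
          rw [← pvIsspace_clean]; exact hs
        by_cases h : cur.isEmpty = true
        · have : cur = [] := by simpa [List.isEmpty_iff] using h
          subst this
          rw [if_pos (by simp)]
          have := ih [] long short
          simp only [List.reverse_nil] at this
          rw [this]
          simp [pvAltGo, hd]
        · rw [if_neg (by simpa [List.isEmpty_reverse] using h)]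
          simp only [List.reverse_reverse]
          rw [pvGo_acc _ [] [cur], List.foldl_append]
          simp only [List.reverse_cons, List.reverse_nil, List.nil_append,
            List.foldl_cons, List.foldl_nil]
          have hcur : cur.isEmpty = false := by simpa using h
          simp only [pvStep, hcur, Bool.false_eq_true, if_neg, not_false_iff]
          simp only [pvAltGo, hd, h, if_pos, Bool.false_eq_true, if_neg, not_false_iff]
          by_cases h3 : 3 ≤ cur.length
          · rw [if_pos h3, if_pos h3]
            have := ih [] (long ++ [String.mk cur]) short
            simpa using this
          · rw [if_neg h3, if_neg h3]
            have := ih [] long (short ++ [String.mk cur])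
            simpa using this
      · rw [if_neg hs]
        have hc : pvClean c = c := pvClean_of_not_space c (by simpa using hs)
        have hd : (pvSpecialB c || PySem.Chars.isspace c) = false := by
          rw [← pvIsspace_clean]; simpa using hs
        rw [hc, show (c :: cur.reverse) = (cur ++ [c]).reverse by simp]
        rw [ih (cur ++ [c]) long short]
        simp [pvAltGo, hd]

-- ===== VERDICT (by name: the statement is the Claim_ definition above) =====
theorem split_query_tokens_py_spec : Claim_equal_split_query_tokens_py := by
  intro query _
  show _ = _
  unfold split_query_tokens_py split_query_tokens_py_alt
  simp only [pvCleaned_eq_map, List.nil_append]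
  have h := pvMain query.toList [] [] []
  simp only [List.reverse_nil] at h
  unfold PySem.Chars.split₀
  rw [show (fun (p : List String × List String) t =>
      if t.isEmpty then p
      else if 3 ≤ t.length then (p.1 ++ [String.mk t], p.2)
      else (p.1, p.2 ++ [String.mk t])) = pvStep from rfl]
  rw [h]
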